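-- pv_equiv track=rewrite | github.com/htang7415/Code-Lab | modules/software-engineering/security-basics/least-privilege/python/least_privilege.py | least_privilege_scopes
-- ===== SOURCE A (Python) =====
-- def least_privilege_scopes(
--     requested_capabilities: list[str],
--     capability_scopes: dict[str, list[str]],
-- ) -> list[str]:
--     if not requested_capabilities:
--         raise ValueError("requested_capabilities must be non-empty")
--
--     scopes: set[str] = set()
--     for capability in requested_capabilities:
--         cleaned_capability = capability.strip()
--         if not cleaned_capability:
--             raise ValueError("requested capabilities must be non-empty")
--         if cleaned_capability not in capability_scopes:
--             raise ValueError(f"unknown capability: {cleaned_capability}")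
--         scopes.update(scope.strip() for scope in capability_scopes[cleaned_capability] if scope.strip())
--     return sorted(scopes)
-- ===== SOURCE B (Python) =====
-- def least_privilege_scopes(
--     requested_capabilities: list[str],
--     capability_scopes: dict[str, list[str]],
-- ) -> list[str]:
--     if not requested_capabilities:
--         raise ValueError("requested_capabilities must be non-empty")
--
--     # stage 1: validate everything up front, remembering the cleaned names
--     cleaned_caps: list[str] = []
--     for capability in requested_capabilities:
--         cleaned_capability = capability.strip()
--         if not cleaned_capability:
--             raise ValueError("requested capabilities must be non-empty")
--         if cleaned_capability not in capability_scopes: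
--             raise ValueError(f"unknown capability: {cleaned_capability}")
--         cleaned_caps.append(cleaned_capability)
--
--     # stage 2: maintain the answer directly as a sorted duplicate-free list,
--     # inserting each cleaned scope in place (no set, no final sort)
--     result: list[str] = []
--     for cap in cleaned_caps:
--         for scope in capability_scopes[cap]:
--             s = scope.strip()
--             if s:
--                 result = _insert_unique_sorted(result, s)
--     return result
--
--
-- def _insert_unique_sorted(sorted_list: list[str], s: str) -> list[str]:
--     i = 0
--     n = len(sorted_list)
--     while i < n and sorted_list[i] < s:
--         i += 1
--     if i < n and sorted_list[i] == s:
--         return sorted_list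
--     return sorted_list[:i] + [s] + sorted_list[i:]
-- ===== Notes on version B (the rewrite author's own statement) =====
-- stated objective: alternative
-- what changed: A accumulates into a hash set inside the validation loop and sorts the set at the end; B first validates all capabilities in a separate pass, then builds the answer incrementally as a sorted duplicate-free list by ordered insertion of each cleaned scope, so there is no set and no final sort
import Mathlib
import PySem

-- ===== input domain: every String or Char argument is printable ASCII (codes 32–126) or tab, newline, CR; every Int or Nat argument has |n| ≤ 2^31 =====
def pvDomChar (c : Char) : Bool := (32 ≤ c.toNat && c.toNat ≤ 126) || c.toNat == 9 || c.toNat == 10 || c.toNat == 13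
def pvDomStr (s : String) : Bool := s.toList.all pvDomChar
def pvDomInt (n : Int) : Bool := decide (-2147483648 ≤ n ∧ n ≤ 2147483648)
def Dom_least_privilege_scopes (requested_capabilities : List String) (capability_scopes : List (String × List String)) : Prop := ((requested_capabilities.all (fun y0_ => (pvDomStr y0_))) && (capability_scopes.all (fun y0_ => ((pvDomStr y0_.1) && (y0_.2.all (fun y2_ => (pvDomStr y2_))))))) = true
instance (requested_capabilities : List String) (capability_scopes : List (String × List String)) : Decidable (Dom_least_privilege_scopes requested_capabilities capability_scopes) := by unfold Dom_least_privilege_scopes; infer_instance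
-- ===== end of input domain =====

-- B replaces A's hash-set accumulation + final sorted() by a two-stage algorithm:
-- validate all capabilities first, then build the answer directly as a sorted
-- duplicate-free list via ordered insertion of each cleaned scope (alternative).

-- ===== PORT A =====
-- 'scope.strip() for scope in lst if scope.strip()'
def lpsClean (lst : List String) : List String :=
  (lst.filter (fun s => PySem.Str.strip s != "")).map PySem.Str.strip

-- A's validation-and-collection loop; none = ValueError
def lpsLoopA (caps : List String) (d : PySem.Dict String (List String))
    (scopes : PySem.Set String) : Option (PySem.Set String) :=
  match caps with
  | [] => some scopes
  | c :: rest =>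
    let cc := PySem.Str.strip c
    if cc = "" then none
    else match d.get? cc with
      | none => none
      | some lst => lpsLoopA rest d (PySem.Set.update scopes (lpsClean lst))

def least_privilege_scopes (requested_capabilities : List String) (capability_scopes : List (String × List String)) : List String :=
  if requested_capabilities = [] then []  -- Python: raise ValueError
  else match lpsLoopA requested_capabilities (PySem.Dict.ofList capability_scopes) PySem.Set.empty with
    | none => []                           -- Python: raise ValueError
    | some s => PySem.List.sorted s (fun x => x) false

-- ===== PORT B =====
-- B's stage 1: validate every capability, returning the cleaned names; none = ValueError
def lpsValidate (caps : List String) (d : PySem.Dict String (List String)) : Option (List String) :=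
  match caps with
  | [] => some []
  | c :: rest =>
    let cc := PySem.Str.strip c
    if cc = "" then none
    else if d.contains cc then (lpsValidate rest d).map (cc :: ·)
    else none

-- _insert_unique_sorted: insert s into a sorted nodup list, skipping if present
def lpsInsert (acc : List String) (s : String) : List String :=
  match acc with
  | [] => [s]
  | x :: xs =>
    if x < s then x :: lpsInsert xs s
    else if x = s then x :: xs
    else s :: x :: xs

-- B's stage 2 inner body: strip the scope, insert it if non-empty
def lpsStep (acc : List String) (scope : String) : List String :=
  let s := PySem.Str.strip scope
  if s ≠ "" then lpsInsert acc s else acc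

-- B's stage 2: nested loops over the validated capabilities and their scope lists
def lpsCollect (caps : List String) (d : PySem.Dict String (List String))
    (acc : List String) : List String :=
  match caps with
  | [] => acc
  | c :: rest => lpsCollect rest d ((d.getD c []).foldl lpsStep acc)

def least_privilege_scopes_alt (requested_capabilities : List String) (capability_scopes : List (String × List String)) : List String :=
  if requested_capabilities = [] then []  -- Python: raise ValueError
  else match lpsValidate requested_capabilities (PySem.Dict.ofList capability_scopes) with
    | none => []                           -- Python: raise ValueError
    | some caps => lpsCollect caps (PySem.Dict.ofList capability_scopes) []

-- ===== PRECONDITION & SPEC =====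
-- Pre_ excludes exactly the inputs on which A raises ValueError: an empty request list,
-- a capability that strips to empty, or a capability absent from the dict.
def Pre_least_privilege_scopes (requested_capabilities : List String) (capability_scopes : List (String × List String)) : Prop :=
  requested_capabilities ≠ [] ∧
  ∀ c ∈ requested_capabilities, PySem.Str.strip c ≠ "" ∧
    (PySem.Dict.ofList capability_scopes).contains (PySem.Str.strip c) = true
instance (requested_capabilities : List String) (capability_scopes : List (String × List String)) : Decidable (Pre_least_privilege_scopes requested_capabilities capability_scopes) := by unfold Pre_least_privilege_scopes; infer_instance

def pvWitness_least_privilege_scopes : List String × (List (String × List String)) :=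
  (["read", " write "], [("read", ["a", "b ", " a"]), ("write", ["c", " "])])

def Spec_least_privilege_scopes (requested_capabilities : List String) (capability_scopes : List (String × List String)) (out : List String) : Prop := out = least_privilege_scopes_alt requested_capabilities capability_scopes
instance (requested_capabilities : List String) (capability_scopes : List (String × List String)) (out : List String) : Decidable (Spec_least_privilege_scopes requested_capabilities capability_scopes out) := by unfold Spec_least_privilege_scopes; infer_instance

-- ===== CLAIM (what is proved, stated in full; the proofs are below) =====
def Claim_equal_least_privilege_scopes : Prop := ∀ (requested_capabilities : List String) (capability_scopes : List (String × List String)), Dom_least_privilege_scopes requested_capabilities capability_scopes → Pre_least_privilege_scopes requested_capabilities capability_scopes → Spec_least_privilege_scopes requested_capabilities capability_scopes (least_privilege_scopes requested_capabilities capability_scopes)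

-- ===== LEMMAS AND PROOFS =====

-- the flattened list of all cleaned scopes of the (already-cleaned) capabilities
def lpsFlat (caps : List String) (d : PySem.Dict String (List String)) : List String :=
  caps.flatMap (fun cc => lpsClean (d.getD cc []))

-- A's loop produces exactly set(flattened cleaned scopes)
theorem lpsLoopA_eq (caps : List String) (d : PySem.Dict String (List String)) :
    ∀ S : PySem.Set String,
      (∀ c ∈ caps, PySem.Str.strip c ≠ "" ∧ d.contains (PySem.Str.strip c) = true) →
      lpsLoopA caps d S = some (PySem.Set.update S (lpsFlat (caps.map PySem.Str.strip) d)) := by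
  induction caps with
  | nil => intro S _; simp [lpsLoopA, lpsFlat, PySem.Set.update]
  | cons c rest ih =>
    intro S h
    obtain ⟨hne, hcon⟩ := h c (List.mem_cons_self ..)
    have hget : (d.get? (PySem.Str.strip c)).isSome := by
      rw [← PySem.Dict.contains_eq_isSome_get?]; exact hcon
    obtain ⟨lst, hlst⟩ := Option.isSome_iff_exists.mp hget
    have hgetD : d.getD (PySem.Str.strip c) [] = lst := by
      simp [PySem.Dict.getD, hlst]
    rw [show (c :: rest).map PySem.Str.strip
        = PySem.Str.strip c :: rest.map PySem.Str.strip from rfl]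
    simp only [lpsLoopA, hne, hlst]
    rw [ih _ (fun c hc => h c (List.mem_cons_of_mem _ hc))]
    simp [lpsFlat, PySem.Set.update, hgetD, List.foldl_append]

-- B's validation returns the cleaned capability names
theorem lpsValidate_eq (caps : List String) (d : PySem.Dict String (List String)) :
    (∀ c ∈ caps, PySem.Str.strip c ≠ "" ∧ d.contains (PySem.Str.strip c) = true) →
    lpsValidate caps d = some (caps.map PySem.Str.strip) := by
  induction caps with
  | nil => intro _; rfl
  | cons c rest ih =>
    intro h
    obtain ⟨hne, hcon⟩ := h c (List.mem_cons_self ..)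
    simp [lpsValidate, hne, hcon, ih (fun c hc => h c (List.mem_cons_of_mem _ hc))]

-- the conditional inner step over raw scopes = plain insertion over cleaned ones
theorem foldl_lpsStep (lst : List String) :
    ∀ acc, lst.foldl lpsStep acc = (lpsClean lst).foldl lpsInsert acc := by
  induction lst with
  | nil => intro acc; rfl
  | cons s t ih =>
    intro acc
    by_cases h : PySem.Str.strip s = "" <;>
      simp [lpsClean, lpsStep, h, List.foldl, ih]

-- B's nested collection = one fold of lpsInsert over the flattened cleaned scopes
theorem lpsCollect_eq (caps : List String) (d : PySem.Dict String (List String)) :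
    ∀ acc, lpsCollect caps d acc = (lpsFlat caps d).foldl lpsInsert acc := by
  induction caps with
  | nil => intro acc; simp [lpsCollect, lpsFlat]
  | cons c rest ih =>
    intro acc
    simp only [lpsCollect, lpsFlat, List.flatMap_cons, List.foldl_append]
    rw [ih, foldl_lpsStep]
    rfl

-- inserting into a strictly sorted list keeps it strictly sorted; members = old ∪ {s}
theorem lpsInsert_spec (s : String) : ∀ acc : List String, acc.Pairwise (· < ·) →
    (lpsInsert acc s).Pairwise (· < ·) ∧
      ∀ y, y ∈ lpsInsert acc s ↔ y ∈ acc ∨ y = s := by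
  intro acc
  induction acc with
  | nil => intro _; simp [lpsInsert]
  | cons x xs ih =>
    intro hpw
    obtain ⟨hx, hxs⟩ := List.pairwise_cons.mp hpw
    by_cases h1 : x < s
    · obtain ⟨hpw', hmem'⟩ := ih hxs
      rw [lpsInsert, if_pos h1]
      constructor
      · refine List.pairwise_cons.mpr ⟨?_, hpw'⟩
        intro y hy
        rcases (hmem' y).mp hy with hy' | rfl
        · exact hx y hy'
        · exact h1
      · intro y; simp [hmem' y]; tauto
    · by_cases h2 : x = s
      · rw [lpsInsert, if_neg h1, if_pos h2]
        exact ⟨hpw, fun y => by subst h2; simp; tauto⟩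
      · have hsx : s < x := lt_of_le_of_ne (not_lt.mp h1) (fun h => h2 h.symm)
        rw [lpsInsert, if_neg h1, if_neg h2]
        constructor
        · refine List.pairwise_cons.mpr ⟨?_, hpw⟩
          intro y hy
          rcases List.mem_cons.mp hy with rfl | hy'
          · exact hsx
          · exact lt_trans hsx (hx y hy')
        · intro y; simp; tauto

theorem lpsFold_spec (L : List String) : ∀ acc : List String, acc.Pairwise (· < ·) →
    (L.foldl lpsInsert acc).Pairwise (· < ·) ∧
      ∀ y, y ∈ L.foldl lpsInsert acc ↔ y ∈ acc ∨ y ∈ L := by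
  induction L with
  | nil => intro acc h; simpa using h
  | cons s t ih =>
    intro acc h
    obtain ⟨h1, h2⟩ := lpsInsert_spec s acc h
    obtain ⟨h3, h4⟩ := ih _ h1
    refine ⟨h3, fun y => ?_⟩
    rw [List.foldl_cons] at *
    simp [h4 y, h2 y]; tauto

-- the real content: sorted(set(L)) = fold of ordered-unique insertion over L
theorem sorted_set_eq_fold (L : List String) :
    PySem.List.sorted (PySem.Set.update PySem.Set.empty L) (fun x => x) false
      = L.foldl lpsInsert [] := by
  obtain ⟨hpw, hmem⟩ := lpsFold_spec L [] (by simp)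
  have hupd : PySem.Set.update PySem.Set.empty L = PySem.Set.ofList L := by
    simp [PySem.Set.update, PySem.Set.ofList_eq_foldl, PySem.Set.empty]
  rw [hupd]
  refine PySem.List.sorted_eq_of_perm_of_pairwise_lt _ _ _ ?_ hpw
  have hnd : (L.foldl lpsInsert []).Nodup := hpw.imp ne_of_lt
  rw [List.perm_ext_iff_of_nodup hnd (PySem.Set.nodup_ofList L)]
  intro y
  rw [hmem y]
  simp [PySem.Set.mem_ofList]

-- ===== VERDICT (by name: the statement is the Claim_ definition above) =====
theorem least_privilege_scopes_spec : Claim_equal_least_privilege_scopes := by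
  intro rc cs _ hpre
  obtain ⟨hne, hall⟩ := hpre
  unfold Spec_least_privilege_scopes least_privilege_scopes least_privilege_scopes_alt
  rw [if_neg hne, if_neg hne,
      lpsLoopA_eq rc (PySem.Dict.ofList cs) PySem.Set.empty hall,
      lpsValidate_eq rc (PySem.Dict.ofList cs) hall]
  dsimp only
  rw [lpsCollect_eq]
  exact sorted_set_eq_fold _
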